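-- pv_equiv track=rewrite | github.com/wanfaliang/Edgar-normalization | tools/generate_manual_review_file.py | classify_tag_nature
-- ===== SOURCE A (Python) =====
-- def classify_tag_nature(tag: str, tlabel: str, statement_type: str, crdr: str) -> str:
--     """
--     Classify the nature of the tag for easier review
--
--     Returns:
--         Category like 'Asset', 'Liability', 'Revenue', 'Expense', etc.
--     """
--     tag_lower = tag.lower()
--     tlabel_lower = tlabel.lower() if tlabel else ""
--
--     # Balance Sheet items
--     if statement_type == 'balance_sheet':
--         # Assets
--         if any(kw in tag_lower for kw in ['asset', 'cash', 'receivable', 'inventory',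
--                                             'property', 'equipment', 'investment', 'goodwill',
--                                             'intangible', 'deferred']):
--             return 'Asset'
--         # Liabilities
--         if any(kw in tag_lower for kw in ['liability', 'liabilities', 'payable', 'debt',
--                                             'loan', 'obligation', 'accrued']):
--             return 'Liability'
--         # Equity
--         if any(kw in tag_lower for kw in ['equity', 'stock', 'capital', 'retained',
--                                             'surplus', 'shares']):
--             return 'Equity'
--         # Use crdr as fallback
--         if crdr == 'D':
--             return 'Asset'
--         elif crdr == 'C':
--             return 'Liability/Equity'
--         return 'Balance Sheet Item'
--
--     # Income Statement items
--     elif statement_type == 'income_statement':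
--         # Revenue
--         if any(kw in tag_lower for kw in ['revenue', 'sales', 'income', 'gain']):
--             if not any(kw in tag_lower for kw in ['expense', 'cost', 'loss']):
--                 return 'Revenue'
--         # Expenses
--         if any(kw in tag_lower for kw in ['expense', 'cost', 'depreciation', 'amortization',
--                                             'interest', 'tax', 'loss']):
--             return 'Expense'
--         # Net Income
--         if any(kw in tag_lower for kw in ['netincome', 'earnings', 'profit']):
--             return 'Net Income'
--         # Use crdr as fallback
--         if crdr == 'C':
--             return 'Revenue'
--         elif crdr == 'D':
--             return 'Expense'
--         return 'Income Statement Item'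
--
--     # Cash Flow items
--     elif statement_type == 'cash_flow':
--         if any(kw in tag_lower for kw in ['operating', 'operatingactivities']):
--             return 'Operating Activity'
--         if any(kw in tag_lower for kw in ['investing', 'investingactivities']):
--             return 'Investing Activity'
--         if any(kw in tag_lower for kw in ['financing', 'financingactivities']):
--             return 'Financing Activity'
--         return 'Cash Flow Item'
--
--     # Equity statement
--     elif statement_type == 'equity':
--         return 'Equity Statement Item'
--
--     return 'Unknown'
-- ===== SOURCE B (Python) =====
-- # Table-driven reimplementation: one rules table per statement type, a single
-- # first-match loop, and a crdr-fallback map; same return values as A.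
--
-- _RULES = {
--     'balance_sheet': (
--         [(['asset', 'cash', 'receivable', 'inventory', 'property', 'equipment',
--            'investment', 'goodwill', 'intangible', 'deferred'], None, 'Asset'),
--          (['liability', 'liabilities', 'payable', 'debt', 'loan', 'obligation',
--            'accrued'], None, 'Liability'),
--          (['equity', 'stock', 'capital', 'retained', 'surplus', 'shares'],
--           None, 'Equity')],
--         {'D': 'Asset', 'C': 'Liability/Equity'},
--         'Balance Sheet Item'),
--     'income_statement': (
--         [(['revenue', 'sales', 'income', 'gain'],
--           ['expense', 'cost', 'loss'], 'Revenue'),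
--          (['expense', 'cost', 'depreciation', 'amortization', 'interest',
--            'tax', 'loss'], None, 'Expense'),
--          (['netincome', 'earnings', 'profit'], None, 'Net Income')],
--         {'C': 'Revenue', 'D': 'Expense'},
--         'Income Statement Item'),
--     'cash_flow': (
--         [(['operating', 'operatingactivities'], None, 'Operating Activity'),
--          (['investing', 'investingactivities'], None, 'Investing Activity'),
--          (['financing', 'financingactivities'], None, 'Financing Activity')],
--         {},
--         'Cash Flow Item'),
--     'equity': ([], {}, 'Equity Statement Item'),
-- }
--
--
-- def classify_tag_nature(tag: str, tlabel: str, statement_type: str, crdr: str) -> str: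
--     rules, crdr_map, default = _RULES.get(statement_type, ([], {}, 'Unknown'))
--     tag_lower = tag.lower()
--     for keywords, exclusions, category in rules:
--         if any(kw in tag_lower for kw in keywords):
--             if exclusions is None or not any(kw in tag_lower for kw in exclusions):
--                 return category
--     return crdr_map.get(crdr, default)
-- ===== Notes on version B (the rewrite author's own statement) =====
-- stated objective: idiomatic
-- what changed: Replaces the hard-coded branch cascade by a declarative rules table (keywords, optional exclusions, category) per statement type plus a crdr-fallback map, evaluated by one generic first-match loop.
import Mathlib
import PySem

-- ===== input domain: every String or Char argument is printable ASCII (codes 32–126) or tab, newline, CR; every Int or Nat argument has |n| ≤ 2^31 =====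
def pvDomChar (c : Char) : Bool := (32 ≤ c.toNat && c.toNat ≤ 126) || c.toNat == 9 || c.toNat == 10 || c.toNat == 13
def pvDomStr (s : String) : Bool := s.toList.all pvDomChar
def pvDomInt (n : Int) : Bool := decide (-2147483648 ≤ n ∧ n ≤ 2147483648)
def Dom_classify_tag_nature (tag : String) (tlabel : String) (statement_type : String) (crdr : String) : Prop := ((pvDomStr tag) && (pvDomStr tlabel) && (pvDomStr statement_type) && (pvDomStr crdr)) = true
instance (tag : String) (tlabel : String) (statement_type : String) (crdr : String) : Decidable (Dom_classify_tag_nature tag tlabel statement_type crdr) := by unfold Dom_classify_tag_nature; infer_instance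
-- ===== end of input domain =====

-- B replaces A's hard-coded branch cascade by a declarative per-statement-type rules table
-- with a generic first-match loop and a crdr-fallback map (objective: idiomatic; same cost).

-- ===== PORT A =====
def classify_tag_nature (tag : String) (tlabel : String) (statement_type : String) (crdr : String) : String :=
  let tag_lower := PySem.Str.lower tag
  let _tlabel_lower := if tlabel ≠ "" then PySem.Str.lower tlabel else ""
  if statement_type = "balance_sheet" then
    if ["asset", "cash", "receivable", "inventory", "property", "equipment", "investment",
        "goodwill", "intangible", "deferred"].any (fun kw => PySem.Str.isIn kw tag_lower) then "Asset"
    else if ["liability", "liabilities", "payable", "debt", "loan", "obligation",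
             "accrued"].any (fun kw => PySem.Str.isIn kw tag_lower) then "Liability"
    else if ["equity", "stock", "capital", "retained", "surplus",
             "shares"].any (fun kw => PySem.Str.isIn kw tag_lower) then "Equity"
    else if crdr = "D" then "Asset"
    else if crdr = "C" then "Liability/Equity"
    else "Balance Sheet Item"
  else if statement_type = "income_statement" then
    if (["revenue", "sales", "income", "gain"].any (fun kw => PySem.Str.isIn kw tag_lower)) ∧
       ¬ (["expense", "cost", "loss"].any (fun kw => PySem.Str.isIn kw tag_lower)) = true then "Revenue"
    else if ["expense", "cost", "depreciation", "amortization", "interest", "tax",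
             "loss"].any (fun kw => PySem.Str.isIn kw tag_lower) then "Expense"
    else if ["netincome", "earnings", "profit"].any (fun kw => PySem.Str.isIn kw tag_lower) then "Net Income"
    else if crdr = "C" then "Revenue"
    else if crdr = "D" then "Expense"
    else "Income Statement Item"
  else if statement_type = "cash_flow" then
    if ["operating", "operatingactivities"].any (fun kw => PySem.Str.isIn kw tag_lower) then "Operating Activity"
    else if ["investing", "investingactivities"].any (fun kw => PySem.Str.isIn kw tag_lower) then "Investing Activity"
    else if ["financing", "financingactivities"].any (fun kw => PySem.Str.isIn kw tag_lower) then "Financing Activity"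
    else "Cash Flow Item"
  else if statement_type = "equity" then "Equity Statement Item"
  else "Unknown"

-- ===== PORT B =====
-- B-side helpers: the rules table and the generic first-match loop
def pvRuleTable : PySem.Dict String (List (List String × Option (List String) × String) × PySem.Dict String String × String) :=
  PySem.Dict.mk
    [("balance_sheet",
      ([(["asset", "cash", "receivable", "inventory", "property", "equipment", "investment",
          "goodwill", "intangible", "deferred"], none, "Asset"),
        (["liability", "liabilities", "payable", "debt", "loan", "obligation", "accrued"],
         none, "Liability"),
        (["equity", "stock", "capital", "retained", "surplus", "shares"], none, "Equity")],
       PySem.Dict.mk [("D", "Asset"), ("C", "Liability/Equity")],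
       "Balance Sheet Item")),
     ("income_statement",
      ([(["revenue", "sales", "income", "gain"], some ["expense", "cost", "loss"], "Revenue"),
        (["expense", "cost", "depreciation", "amortization", "interest", "tax", "loss"],
         none, "Expense"),
        (["netincome", "earnings", "profit"], none, "Net Income")],
       PySem.Dict.mk [("C", "Revenue"), ("D", "Expense")],
       "Income Statement Item")),
     ("cash_flow",
      ([(["operating", "operatingactivities"], none, "Operating Activity"),
        (["investing", "investingactivities"], none, "Investing Activity"),
        (["financing", "financingactivities"], none, "Financing Activity")],
       PySem.Dict.empty,
       "Cash Flow Item")),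
     ("equity", ([], PySem.Dict.empty, "Equity Statement Item"))]

def pvFirstMatch (tag_lower : String) :
    List (List String × Option (List String) × String) → Option String
  | [] => none
  | (keywords, exclusions, category) :: rest =>
    if keywords.any (fun kw => PySem.Str.isIn kw tag_lower) then
      if (match exclusions with
          | none => true
          | some ex => !(ex.any (fun kw => PySem.Str.isIn kw tag_lower))) then
        some category
      else pvFirstMatch tag_lower rest
    else pvFirstMatch tag_lower rest

def classify_tag_nature_alt (tag : String) (tlabel : String) (statement_type : String) (crdr : String) : String :=
  let entry := (pvRuleTable.get? statement_type).getD ([], PySem.Dict.empty, "Unknown")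
  let tag_lower := PySem.Str.lower tag
  match pvFirstMatch tag_lower entry.1 with
  | some category => category
  | none => entry.2.1.getD crdr entry.2.2

-- ===== PRECONDITION & SPEC =====
def Spec_classify_tag_nature (tag : String) (tlabel : String) (statement_type : String) (crdr : String) (out : String) : Prop := out = classify_tag_nature_alt tag tlabel statement_type crdr
instance (tag : String) (tlabel : String) (statement_type : String) (crdr : String) (out : String) : Decidable (Spec_classify_tag_nature tag tlabel statement_type crdr out) := by unfold Spec_classify_tag_nature; infer_instance

-- ===== CLAIM (what is proved, stated in full; the proofs are below) =====
def Claim_equal_classify_tag_nature : Prop := ∀ (tag : String) (tlabel : String) (statement_type : String) (crdr : String), Dom_classify_tag_nature tag tlabel statement_type crdr → Spec_classify_tag_nature tag tlabel statement_type crdr (classify_tag_nature tag tlabel statement_type crdr)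

-- ===== LEMMAS AND PROOFS =====

-- ===== VERDICT (by name: the statement is the Claim_ definition above) =====
theorem pv_beq_lit_false {a b : String} (h : ¬ b = a) : (a == b) = false := by
  simp only [beq_eq_false_iff_ne]; exact fun e => h e.symm

theorem classify_tag_nature_spec : Claim_equal_classify_tag_nature := by
  intro tag tlabel statement_type crdr _
  unfold Spec_classify_tag_nature classify_tag_nature classify_tag_nature_alt
  by_cases h1 : statement_type = "balance_sheet"
  · subst h1
    norm_num [pvRuleTable, pvFirstMatch, PySem.Dict.get?_mk_cons, PySem.Dict.getD, PySem.Dict.get?]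
    split_ifs <;> simp_all [pvFirstMatch, List.find?, pv_beq_lit_false, PySem.Dict.empty]
  by_cases h2 : statement_type = "income_statement"
  · subst h2
    norm_num [pvRuleTable, pvFirstMatch, PySem.Dict.get?_mk_cons, PySem.Dict.getD, PySem.Dict.get?]
    split_ifs <;> simp_all [pvFirstMatch, List.find?, pv_beq_lit_false, PySem.Dict.empty] <;>
      (try (split_ifs <;> simp_all))
  by_cases h3 : statement_type = "cash_flow"
  · subst h3
    norm_num [pvRuleTable, pvFirstMatch, PySem.Dict.get?_mk_cons, PySem.Dict.getD, PySem.Dict.get?]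
    split_ifs <;> simp_all [pvFirstMatch, List.find?, pv_beq_lit_false, PySem.Dict.empty]
  by_cases h4 : statement_type = "equity"
  · subst h4
    rfl
  · norm_num [pvRuleTable, pvFirstMatch, PySem.Dict.get?_mk_cons, PySem.Dict.getD, PySem.Dict.get?,
      PySem.Dict.empty, List.find?, h1, h2, h3, h4,
      pv_beq_lit_false h1, pv_beq_lit_false h2, pv_beq_lit_false h3, pv_beq_lit_false h4]
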